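-- pv_equiv track=rewrite | github.com/DongYun666/leetcode | 891. 子序列宽度之和.py | sumSubseqWidths1
-- ===== SOURCE A (Python) =====
-- from typing import List
--
-- def sumSubseqWidths1(nums: List[int]) -> int:
--     nums.sort()
--     res = 0
--     mod = 10**9+7
--     for i in range(len(nums)):
--         t = 1
--         for j in range(i+1,len(nums)):
--             res = (res+(nums[j] - nums[i])*t)%mod
--             t<<=1
--     return res
-- ===== SOURCE B (Python) =====
-- def sumSubseqWidths1(nums):
--     nums.sort()
--     mod = 10**9 + 7
--     res = 0
--     g = 0    # sum over earlier elements a_k of a_k * 2^(i-1-k), mod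
--     pw = 1   # 2^i mod
--     for x in nums:
--         res = (res + x * (pw - 1) - g) % mod
--         g = (2 * g + x) % mod
--         pw = pw * 2 % mod
--     return res
-- ===== Notes on version B (the rewrite author's own statement) =====
-- stated objective: faster
-- what changed: Replaces the O(n^2) nested loop over pairs by a single O(n) pass over the sorted list that maintains a running weighted prefix sum and power of two, so each element's total contribution is added in O(1).
import Mathlib
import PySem

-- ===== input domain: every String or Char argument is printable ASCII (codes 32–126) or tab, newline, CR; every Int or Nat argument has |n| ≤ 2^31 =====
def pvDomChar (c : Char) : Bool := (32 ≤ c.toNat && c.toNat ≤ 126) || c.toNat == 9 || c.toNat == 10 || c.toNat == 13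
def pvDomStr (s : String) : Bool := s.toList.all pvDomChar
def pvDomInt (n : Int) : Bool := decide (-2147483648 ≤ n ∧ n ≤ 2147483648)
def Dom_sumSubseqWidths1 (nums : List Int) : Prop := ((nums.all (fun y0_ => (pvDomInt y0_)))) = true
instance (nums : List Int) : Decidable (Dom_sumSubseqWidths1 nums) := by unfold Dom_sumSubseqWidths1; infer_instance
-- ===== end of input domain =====

-- B replaces A's O(n^2) pair loop by one O(n) pass over the sorted list (running prefix
-- accumulator + power of two); both Pythons sort the argument list in place (same side
-- effect); the equivalence proved here is about the return value.

-- ===== PORT A =====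
def sumSubseqWidths1 (nums : List Int) : Int :=
  let a := PySem.List.sorted nums (fun x => x) false
  let md : Int := 1000000007
  (PySem.List.pyRange 0 (a.length : Int) 1).foldl
    (fun res i =>
      ((PySem.List.pyRange (i + 1) (a.length : Int) 1).foldl
        (fun (s : Int × Int) j =>
          (PySem.Int.mod (s.1 + (PySem.List.pyGetD a j 0 - PySem.List.pyGetD a i 0) * s.2) md,
           s.2 * 2))
        (res, 1)).1)
    0

-- ===== PORT B =====
def sumSubseqWidths1_alt (nums : List Int) : Int :=
  let a := PySem.List.sorted nums (fun x => x) false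
  let md : Int := 1000000007
  (a.foldl
    (fun (s : Int × Int × Int) x =>
      (PySem.Int.mod (s.1 + x * (s.2.2 - 1) - s.2.1) md,
       PySem.Int.mod (2 * s.2.1 + x) md,
       PySem.Int.mod (s.2.2 * 2) md))
    (0, 0, 1)).1

-- ===== PRECONDITION & SPEC =====
def Spec_sumSubseqWidths1 (nums : List Int) (out : Int) : Prop := out = sumSubseqWidths1_alt nums
instance (nums : List Int) (out : Int) : Decidable (Spec_sumSubseqWidths1 nums out) := by unfold Spec_sumSubseqWidths1; infer_instance

-- ===== CLAIM (what is proved, stated in full; the proofs are below) =====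
def Claim_equal_sumSubseqWidths1 : Prop := ∀ (nums : List Int), Dom_sumSubseqWidths1 nums → Spec_sumSubseqWidths1 nums (sumSubseqWidths1 nums)

-- ===== LEMMAS AND PROOFS =====

-- Σ_k (l_k - x) * t * 2^k : the true (un-reduced) value accumulated by A's inner loop.
def rowAcc (x t : Int) : List Int → Int
  | [] => 0
  | y :: l => (y - x) * t + rowAcc x (t * 2) l

-- Σ_{i<j} (a_j - a_i) * 2^(j-i-1) : the true value of A's double loop.
def wsum : List Int → Int
  | [] => 0
  | x :: l => rowAcc x 1 l + wsum l

-- Σ_k 2^k * l_k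
def msum : List Int → Int
  | [] => 0
  | x :: l => x + 2 * msum l

-- the true (un-reduced) state evolution of B's single pass
def trueB : List Int → Int → Int → Int → Int
  | [], res, _, _ => res
  | x :: l, res, g, pw => trueB l (res + x * (pw - 1) - g) (2 * g + x) (pw * 2)

theorem emod_shift (m r d : Int) : (r % m + d) % m = (r + d) % m := by
  rw [Int.add_emod r d, Int.add_emod (r % m) d, Int.emod_emod_of_dvd _ dvd_rfl]

theorem inner_char (m : Int) (hm : 0 < m) (x : Int) :
    ∀ (l : List Int) (r t : Int),
      (l.foldl (fun (s : Int × Int) y =>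
          (PySem.Int.mod (s.1 + (y - x) * s.2) m, s.2 * 2)) (r % m, t)).1
        = (r + rowAcc x t l) % m := by
  intro l
  induction l with
  | nil => intro r t; simp [rowAcc]
  | cons y l ih =>
    intro r t
    rw [List.foldl_cons]
    have h1 : (PySem.Int.mod (r % m + (y - x) * t) m, t * 2)
        = ((r + (y - x) * t) % m, t * 2) := by
      rw [PySem.Int.mod_eq_emod_of_pos hm, emod_shift]
    rw [h1, ih (r + (y - x) * t) (t * 2)]
    simp only [rowAcc]
    rw [add_assoc]

theorem outer_char (m : Int) (hm : 0 < m) (a : List Int) :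
    ∀ (c : ℕ) (k : ℕ) (r : Int), a.length - k = c → k ≤ a.length →
      ((PySem.List.pyRange (k : Int) (a.length : Int) 1).foldl
        (fun res i =>
          ((PySem.List.pyRange (i + 1) (a.length : Int) 1).foldl
            (fun (s : Int × Int) j =>
              (PySem.Int.mod (s.1 + (PySem.List.pyGetD a j 0 - PySem.List.pyGetD a i 0) * s.2) m,
               s.2 * 2))
            (res, 1)).1)
        (r % m))
        = (r + wsum (a.drop k)) % m := by
  intro c
  induction c with
  | zero =>
    intro k r hc hk
    have hk' : k = a.length := by omega
    subst hk'
    rw [PySem.List.pyRange_one_eq_nil (by omega)]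
    simp [wsum]
  | succ c ih =>
    intro k r hc hk
    have hklt : k < a.length := by omega
    rw [PySem.List.pyRange_one_cons (by exact_mod_cast hklt)]
    simp only [List.foldl_cons]
    have hget : PySem.List.pyGetD a ((k : ℕ) : ℤ) 0 = a[k] := by
      rw [PySem.List.pyGetD_natCast]
      exact List.getD_eq_getElem a 0 hklt
    have hcast : ((k : ℤ) + 1) = (((k + 1 : ℕ)) : ℤ) := by push_cast; ring
    simp only [hget, hcast]
    have h2 := PySem.List.foldl_pyRange_pyGetD' a 0
      (fun (s : Int × Int) y => (PySem.Int.mod (s.1 + (y - a[k]) * s.2) m, s.2 * 2))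
      ((r % m, 1) : Int × Int) (a := ((k + 1 : ℕ) : ℤ)) (Int.natCast_nonneg (k + 1))
    simp only [Int.toNat_natCast] at h2
    rw [h2]
    rw [inner_char m hm (a[k]) (a.drop (k + 1)) r 1]
    rw [ih (k + 1) (r + rowAcc (a[k]) 1 (a.drop (k + 1))) (by omega) (by omega)]
    rw [List.drop_eq_getElem_cons hklt]
    simp only [wsum]
    rw [add_assoc]

theorem A_char (nums : List Int) :
    sumSubseqWidths1 nums
      = wsum (PySem.List.sorted nums (fun x => x) false) % (1000000007) := by
  unfold sumSubseqWidths1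
  have h := outer_char (1000000007) (by norm_num)
    (PySem.List.sorted nums (fun x => x) false) (PySem.List.sorted nums (fun x => x) false).length
    0 0 (by omega) (by omega)
  simpa using h

theorem b_char (m : Int) (hm : 0 < m) :
    ∀ (l : List Int) (r g pw : Int),
      (l.foldl (fun (s : Int × Int × Int) x =>
          (PySem.Int.mod (s.1 + x * (s.2.2 - 1) - s.2.1) m,
           PySem.Int.mod (2 * s.2.1 + x) m,
           PySem.Int.mod (s.2.2 * 2) m)) (r % m, g % m, pw % m)).1
        = trueB l r g pw % m := by
  intro l
  induction l with
  | nil => intro r g pw; simp [trueB]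
  | cons x l ih =>
    intro r g pw
    simp only [List.foldl_cons]
    have h1 : PySem.Int.mod (r % m + x * (pw % m - 1) - g % m) m
        = (r + x * (pw - 1) - g) % m := by
      rw [PySem.Int.mod_eq_emod_of_pos hm]
      have hr : Int.ModEq m (r % m) r := Int.emod_emod_of_dvd r dvd_rfl
      have hg : Int.ModEq m (g % m) g := Int.emod_emod_of_dvd g dvd_rfl
      have hpw : Int.ModEq m (pw % m) pw := Int.emod_emod_of_dvd pw dvd_rfl
      exact (hr.add ((Int.ModEq.refl x).mul (hpw.sub (Int.ModEq.refl 1)))).sub hg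
    have h2 : PySem.Int.mod (2 * (g % m) + x) m = (2 * g + x) % m := by
      rw [PySem.Int.mod_eq_emod_of_pos hm]
      have hg : Int.ModEq m (g % m) g := Int.emod_emod_of_dvd g dvd_rfl
      exact ((Int.ModEq.refl 2).mul hg).add (Int.ModEq.refl x)
    have h3 : PySem.Int.mod ((pw % m) * 2) m = (pw * 2) % m := by
      rw [PySem.Int.mod_eq_emod_of_pos hm]
      have hpw : Int.ModEq m (pw % m) pw := Int.emod_emod_of_dvd pw dvd_rfl
      exact hpw.mul (Int.ModEq.refl 2)
    rw [h1, h2, h3, ih (r + x * (pw - 1) - g) (2 * g + x) (pw * 2)]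
    rfl

theorem rowAcc_closed (x : Int) : ∀ (l : List Int) (t : Int),
    rowAcc x t l = t * (msum l - x * (2 ^ l.length - 1)) := by
  intro l
  induction l with
  | nil => intro t; simp [rowAcc, msum]
  | cons y l ih =>
    intro t
    simp only [rowAcc, msum, ih (t * 2), List.length_cons, pow_succ]
    ring

theorem trueB_closed : ∀ (l : List Int) (r g pw : Int),
    trueB l r g pw = r + wsum l + (pw - 1) * msum l - g * (2 ^ l.length - 1) := by
  intro l
  induction l with
  | nil => intro r g pw; simp [trueB, wsum, msum]
  | cons x l ih =>
    intro r g pw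
    simp only [trueB, wsum, msum, List.length_cons, pow_succ, ih, rowAcc_closed]
    ring

theorem B_char (nums : List Int) :
    sumSubseqWidths1_alt nums
      = wsum (PySem.List.sorted nums (fun x => x) false) % (1000000007) := by
  unfold sumSubseqWidths1_alt
  have h0 : ((0 : Int), (0 : Int), (1 : Int))
      = ((0 : Int) % (1000000007), (0 : Int) % (1000000007), (1 : Int) % (1000000007)) := by
    norm_num
  have h := b_char (1000000007) (by norm_num)
    (PySem.List.sorted nums (fun x => x) false) 0 0 1
  rw [trueB_closed] at h
  rw [show (0 : Int) + wsum (PySem.List.sorted nums (fun x => x) false)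
      + (1 - 1) * msum (PySem.List.sorted nums (fun x => x) false)
      - 0 * (2 ^ (PySem.List.sorted nums (fun x => x) false).length - 1)
      = wsum (PySem.List.sorted nums (fun x => x) false) by ring] at h
  rw [h0] at *
  simpa using h

-- ===== VERDICT (by name: the statement is the Claim_ definition above) =====
theorem sumSubseqWidths1_spec : Claim_equal_sumSubseqWidths1 := by
  intro nums _
  unfold Spec_sumSubseqWidths1
  rw [A_char, B_char]
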